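-- pv_equiv track=rewrite | github.com/gurhar1133/RSAfun | RSAlib.py | is_not_div
-- ===== SOURCE A (Python) =====
-- def is_not_div(n):
--     divs = [2, 3, 5, 7, 11, 13, 17, 19,
--     23, 29, 31, 37, 41, 43, 47, 53, 59,
--     61, 67, 71, 73, 79, 83, 89, 97]
--     # checks divisibility against each number in divs
--     for num in divs:
--         if n % num == 0:
--             return False
--     return True
-- ===== SOURCE B (Python) =====
-- def is_not_div(n):
--     # coprime to the product of the listed primes <=> none of them divides n
--     P = 2305567963945518424753102147331756070
--     a, b = P, abs(n)
--     while b: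
--         a, b = b, a % b
--     return a == 1
-- ===== Notes on version B (the rewrite author's own statement) =====
-- stated objective: alternative
-- what changed: Replaces the trial-division scan over the prime list with a single Euclidean gcd of |n| against the hard-coded product of those primes (coprime to the product iff none of them divides n).
import Mathlib
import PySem

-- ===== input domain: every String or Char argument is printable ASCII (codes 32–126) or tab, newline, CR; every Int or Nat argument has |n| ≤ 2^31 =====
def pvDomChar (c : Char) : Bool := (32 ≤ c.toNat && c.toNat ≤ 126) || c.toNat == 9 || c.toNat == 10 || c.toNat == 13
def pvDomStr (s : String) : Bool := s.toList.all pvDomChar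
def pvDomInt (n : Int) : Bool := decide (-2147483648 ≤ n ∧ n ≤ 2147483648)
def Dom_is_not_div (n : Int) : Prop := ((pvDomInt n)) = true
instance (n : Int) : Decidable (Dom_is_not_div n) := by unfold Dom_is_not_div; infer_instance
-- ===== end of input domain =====

-- B replaces A's trial-division scan with one Euclidean gcd of abs(n) against the
-- hard-coded product of the listed primes (alternative algorithm, same cost class).

-- ===== PORT A =====
-- the 'for num in divs' loop: first divisor with n % num == 0 returns False
def divLoop (n : Int) : List Int → Bool
  | [] => true
  | p :: ps => if PySem.Int.mod n p == 0 then false else divLoop n ps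

def is_not_div (n : Int) : Bool :=
  divLoop n [2, 3, 5, 7, 11, 13, 17, 19,
    23, 29, 31, 37, 41, 43, 47, 53, 59,
    61, 67, 71, 73, 79, 83, 89, 97]

-- ===== PORT B =====
-- the 'while b: a, b = b, a % b' Euclid loop of Source B (both operands are Nats: P and abs(n))
def gcdLoop (a b : Nat) : Nat :=
  if h : b = 0 then a else gcdLoop b (a % b)
termination_by b
decreasing_by exact Nat.mod_lt _ (Nat.pos_of_ne_zero h)

def is_not_div_alt (n : Int) : Bool :=
  gcdLoop 2305567963945518424753102147331756070 n.natAbs == 1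

-- ===== PRECONDITION & SPEC =====
def Spec_is_not_div (n : Int) (out : Bool) : Prop := out = is_not_div_alt n
instance (n : Int) (out : Bool) : Decidable (Spec_is_not_div n out) := by unfold Spec_is_not_div; infer_instance

-- ===== CLAIM (what is proved, stated in full; the proofs are below) =====
def Claim_equal_is_not_div : Prop := ∀ (n : Int), Dom_is_not_div n → Spec_is_not_div n (is_not_div n)

-- ===== LEMMAS AND PROOFS =====

-- the Euclid loop is Nat.gcd (with swapped arguments)
theorem gcdLoop_eq_gcd (a b : Nat) : gcdLoop a b = Nat.gcd b a := by
  induction b using Nat.strong_induction_on generalizing a with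
  | _ b ih =>
    unfold gcdLoop
    by_cases h : b = 0
    · simp [h]
    · rw [dif_neg h, ih (a % b) (Nat.mod_lt _ (Nat.pos_of_ne_zero h)) b,
        Nat.gcd_rec b a]

-- A's loop returns true iff no listed divisor divides n
theorem divLoop_eq (n : Int) (ps : List Int) :
    divLoop n ps = decide (∀ p ∈ ps, ¬ p ∣ n) := by
  induction ps with
  | nil => simp [divLoop]
  | cons p ps ih =>
    simp only [divLoop, ih, beq_iff_eq, PySem.Int.mod_eq_zero_iff_dvd]
    by_cases h : p ∣ n <;> simp [h]

-- coprimality to a product of primes is exactly 'no factor divides'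
theorem coprime_prod_iff (m : Nat) (ps : List Nat) (hp : ∀ p ∈ ps, p.Prime) :
    Nat.Coprime m ps.prod ↔ ∀ p ∈ ps, ¬ p ∣ m := by
  induction ps with
  | nil => simp [Nat.Coprime]
  | cons p ps ih =>
    have hpp : p.Prime := hp p (by simp)
    rw [List.prod_cons, Nat.coprime_mul_iff_right,
      ih (fun q hq => hp q (List.mem_cons_of_mem _ hq))]
    simp only [List.mem_cons, forall_eq_or_imp]
    constructor
    · rintro ⟨h1, h2⟩
      exact ⟨(hpp.coprime_iff_not_dvd).mp (Nat.Coprime.symm h1), h2⟩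
    · rintro ⟨h1, h2⟩
      exact ⟨Nat.Coprime.symm ((hpp.coprime_iff_not_dvd).mpr h1), h2⟩

def pvPrimes : List Nat := [2, 3, 5, 7, 11, 13, 17, 19,
  23, 29, 31, 37, 41, 43, 47, 53, 59,
  61, 67, 71, 73, 79, 83, 89, 97]

theorem pvPrimes_prime : ∀ p ∈ pvPrimes, p.Prime := by decide

theorem pvPrimes_prod : pvPrimes.prod = 2305567963945518424753102147331756070 := by decide

theorem is_not_div_spec : Claim_equal_is_not_div := by
  intro n _
  unfold Spec_is_not_div is_not_div is_not_div_alt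
  rw [gcdLoop_eq_gcd, ← pvPrimes_prod]
  have hchar : Nat.Coprime n.natAbs pvPrimes.prod ↔ ∀ p ∈ pvPrimes, ¬ p ∣ n.natAbs :=
    coprime_prod_iff _ _ pvPrimes_prime
  have hdvd : ∀ p : Nat, (p ∣ n.natAbs ↔ (p : Int) ∣ n) := by
    intro p
    rw [← Int.natAbs_dvd_natAbs]
    simp
  rw [show ([2, 3, 5, 7, 11, 13, 17, 19, 23, 29, 31, 37, 41, 43, 47, 53, 59,
      61, 67, 71, 73, 79, 83, 89, 97] : List Int) = pvPrimes.map (Int.ofNat) by decide,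
    divLoop_eq]
  simp only [List.mem_map, Int.ofNat_eq_natCast, forall_exists_index, and_imp,
    forall_apply_eq_imp_iff₂]
  rw [show (Nat.gcd n.natAbs pvPrimes.prod == 1) = decide (Nat.gcd n.natAbs pvPrimes.prod = 1) from rfl,
    decide_eq_decide,
    show (Nat.gcd n.natAbs pvPrimes.prod = 1) ↔ Nat.Coprime n.natAbs pvPrimes.prod from Iff.rfl,
    hchar]
  exact forall₂_congr (fun p hp => not_congr (hdvd p).symm)
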